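-- pv_equiv track=rewrite | github.com/lemonforest/python-chess4d-oana-chiru | scripts/analyze_issue7_rerun.py | longest_constant_run
-- ===== SOURCE A (Python) =====
-- def longest_constant_run(values: list[int]) -> tuple[int, int, int]:
--     """Return (length, onset_index, plateau_value) of the longest constant run."""
--     best_len = 1
--     best_onset = 0
--     best_val = values[0]
--     cur_len = 1
--     cur_onset = 0
--     for i in range(1, len(values)):
--         if values[i] == values[i - 1]:
--             cur_len += 1
--         else:
--             cur_len = 1
--             cur_onset = i
--         if cur_len > best_len:
--             best_len = cur_len
--             best_onset = cur_onset
--             best_val = values[i]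
--     return best_len, best_onset, best_val
-- ===== SOURCE B (Python) =====
-- def longest_constant_run(values: list[int]) -> tuple[int, int, int]:
--     """Return (length, onset_index, plateau_value) of the longest constant run."""
--     best = (1, 0, values[0])
--     i = 0
--     n = len(values)
--     while i < n:
--         j = i + 1
--         while j < n and values[j] == values[i]:
--             j += 1
--         if j - i > best[0]:
--             best = (j - i, i, values[i])
--         i = j
--     return best
-- ===== Notes on version B (the rewrite author's own statement) =====
-- stated objective: alternative
-- what changed: B splits the list into maximal constant runs (an inner scan finds each run's end) and keeps the first strictly-longest run, instead of A's per-index loop maintaining cur_len/cur_onset/best counters.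
import Mathlib
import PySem

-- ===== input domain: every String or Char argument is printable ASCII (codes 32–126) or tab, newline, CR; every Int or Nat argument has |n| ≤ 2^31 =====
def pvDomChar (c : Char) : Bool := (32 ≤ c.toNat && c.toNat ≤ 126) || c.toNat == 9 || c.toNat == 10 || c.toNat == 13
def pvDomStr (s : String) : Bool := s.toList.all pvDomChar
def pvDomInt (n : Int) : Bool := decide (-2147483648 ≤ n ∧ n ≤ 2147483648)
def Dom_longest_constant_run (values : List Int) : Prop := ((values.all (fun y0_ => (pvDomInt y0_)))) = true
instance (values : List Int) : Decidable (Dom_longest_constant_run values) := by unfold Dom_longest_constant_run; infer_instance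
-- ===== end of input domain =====

-- B replaces A's per-index cur/best counter loop by a scan over maximal constant runs
-- (alternative decomposition, same O(n) cost); behaviour on every non-empty list is identical.


-- ===== PORT A =====
-- loop body of A's 'for i in range(1, len(values))'; state = (best_len, best_onset, best_val, cur_len, cur_onset)
def lcrBody (values : List Int) (st : Int × Int × Int × Int × Int) (i : Int) :
    Int × Int × Int × Int × Int :=
  let p := if PySem.List.pyGetD values i 0 == PySem.List.pyGetD values (i - 1) 0
           then (st.2.2.2.1 + 1, st.2.2.2.2) else (1, i)
  if p.1 > st.1 then (p.1, p.2, PySem.List.pyGetD values i 0, p.1, p.2)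
  else (st.1, st.2.1, st.2.2.1, p.1, p.2)

def longest_constant_run (values : List Int) : Int × Int × Int :=
  -- values[0] raises IndexError on []; that input is excluded by Pre_ (default 0 is never read under Pre_)
  let bv := PySem.List.pyGetD values 0 0
  let r := (PySem.List.pyRange 1 (values.length : Int) 1).foldl (lcrBody values) (1, 0, bv, 1, 0)
  (r.1, r.2.1, r.2.2.1)

-- ===== PORT B =====
-- outer while-loop of Source B: consume one maximal run per step (the inner while-scan is the takeWhile)
def lcrRun : List Int → Int → (Int × Int × Int) → Int × Int × Int
  | [], _, best => best
  | v :: rest, i, best =>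
    let k : Int := 1 + ((rest.takeWhile (fun y => y == v)).length : Int)
    let best' := if k > best.1 then (k, i, v) else best
    lcrRun (rest.dropWhile (fun y => y == v)) (i + k) best'
termination_by l => l.length
decreasing_by
  simpa using Nat.lt_succ_of_le (List.length_dropWhile_le (fun y => y == v) rest)

def longest_constant_run_alt (values : List Int) : Int × Int × Int :=
  match values with
  | [] => (1, 0, 0)  -- unreachable: Python B raises IndexError on [] (outside Pre_)
  | v :: _ => lcrRun values 0 (1, 0, v)

-- ===== PRECONDITION & SPEC =====
-- Both A and B raise IndexError (values[0]) on the empty list; Pre_ excludes exactly it.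
def Pre_longest_constant_run (values : List Int) : Prop := values ≠ []
instance (values : List Int) : Decidable (Pre_longest_constant_run values) := by unfold Pre_longest_constant_run; infer_instance
def pvWitness_longest_constant_run : List Int := [3, 3, 1]

def Spec_longest_constant_run (values : List Int) (out : Int × Int × Int) : Prop := out = longest_constant_run_alt values
instance (values : List Int) (out : Int × Int × Int) : Decidable (Spec_longest_constant_run values out) := by unfold Spec_longest_constant_run; infer_instance

-- ===== CLAIM (what is proved, stated in full; the proofs are below) =====
def Claim_equal_longest_constant_run : Prop := ∀ (values : List Int), Dom_longest_constant_run values → Pre_longest_constant_run values → Spec_longest_constant_run values (longest_constant_run values)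

-- ===== LEMMAS AND PROOFS =====

-- A's loop, rewritten as structural recursion over the tail of the list:
-- aRec prev best (cur_len, cur_onset) i rest processes indices i, i+1, … whose values are rest,
-- with values[i-1] = prev.
def aRec : Int → (Int × Int × Int) → Int × Int → Int → List Int → Int × Int × Int
  | _, best, _, _, [] => best
  | prev, best, cur, i, x :: rest =>
    let p := if x == prev then (cur.1 + 1, cur.2) else (1, i)
    let best' := if p.1 > best.1 then (p.1, p.2, x) else best
    aRec x best' p (i + 1) rest

def proj3 (r : Int × Int × Int × Int × Int) : Int × Int × Int := (r.1, r.2.1, r.2.2.1)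

theorem lcrRun_cons (v : Int) (rest : List Int) (i : Int) (best : Int × Int × Int) :
    lcrRun (v :: rest) i best =
    lcrRun (rest.dropWhile (fun y => y == v))
      (i + (1 + ((rest.takeWhile (fun y => y == v)).length : Int)))
      (if 1 + ((rest.takeWhile (fun y => y == v)).length : Int) > best.1
       then (1 + ((rest.takeWhile (fun y => y == v)).length : Int), i, v) else best) := by
  simp only [lcrRun]

theorem mainRun : ∀ (n : Nat) (rest : List Int), rest.length ≤ n →
    ∀ (prev : Int) (best : Int × Int × Int) (cl co i : Int), 1 ≤ cl → cl ≤ best.1 →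
    aRec prev best (cl, co) i rest =
    lcrRun (rest.dropWhile (fun y => y == prev))
      (i + ((rest.takeWhile (fun y => y == prev)).length : Int))
      (if cl + ((rest.takeWhile (fun y => y == prev)).length : Int) > best.1
       then (cl + ((rest.takeWhile (fun y => y == prev)).length : Int), co, prev) else best) := by
  intro n
  induction n with
  | zero =>
    intro rest hlen prev best cl co i h1 h2
    have h0 : rest = [] := List.eq_nil_of_length_eq_zero (Nat.le_zero.mp hlen)
    subst h0
    simp only [List.dropWhile_nil, List.takeWhile_nil, List.length_nil, Int.natCast_zero,
      add_zero, aRec, lcrRun]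
    rw [if_neg (by omega)]
  | succ n ih =>
    intro rest hlen prev best cl co i h1 h2
    cases rest with
    | nil =>
      simp only [List.dropWhile_nil, List.takeWhile_nil, List.length_nil, Int.natCast_zero,
        add_zero, aRec, lcrRun]
      rw [if_neg (by omega)]
    | cons x rest' =>
      have hlen' : rest'.length ≤ n := by simp at hlen; omega
      rcases eq_or_ne x prev with hx | hx
      · subst hx
        have hstep : aRec x best (cl, co) i (x :: rest') =
            aRec x (if cl + 1 > best.1 then (cl + 1, co, x) else best) (cl + 1, co) (i + 1) rest' := by
          simp [aRec]
        rw [hstep, ih rest' hlen' x (if cl + 1 > best.1 then (cl + 1, co, x) else best)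
          (cl + 1) co (i + 1) (by omega) (by split_ifs with h <;> simp; omega)]
        simp only [List.dropWhile_cons, List.takeWhile_cons, beq_self_eq_true, if_true,
          List.length_cons]
        push_cast
        congr 1
        · omega
        · split_ifs with h1' h2' h3' h4' h5' <;> simp_all [Prod.ext_iff] <;> omega
      · have hbx : (x == prev) = false := beq_eq_false_iff_ne.mpr hx
        have hstep : aRec prev best (cl, co) i (x :: rest') =
            aRec x best (1, i) (i + 1) rest' := by
          simp only [aRec, hbx, Bool.false_eq_true, if_false]
          rw [if_neg (by omega)]
        rw [hstep, ih rest' hlen' x best 1 i (i + 1) (by omega) (by omega)]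
        simp only [List.dropWhile_cons, List.takeWhile_cons, hbx, Bool.false_eq_true, if_false,
          List.length_nil, Int.natCast_zero, add_zero]
        rw [if_neg (show ¬ cl > best.1 by omega), lcrRun_cons,
          show i + 1 + ((List.takeWhile (fun y => y == x) rest').length : Int)
             = i + (1 + ((List.takeWhile (fun y => y == x) rest').length : Int)) from by ring]

theorem bridgeA : ∀ (rest pre : List Int) (prev : Int) (st : Int × Int × Int × Int × Int),
    proj3 ((PySem.List.pyRange ((pre.length : Int) + 1) (((pre ++ prev :: rest).length : Int)) 1).foldl
        (lcrBody (pre ++ prev :: rest)) st)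
    = aRec prev (st.1, st.2.1, st.2.2.1) (st.2.2.2.1, st.2.2.2.2) ((pre.length : Int) + 1) rest := by
  intro rest
  induction rest with
  | nil =>
    intro pre prev st
    rw [PySem.List.pyRange_one_eq_nil (by simp)]
    simp [aRec, proj3]
  | cons x rest' ih =>
    intro pre prev st
    have hcons : PySem.List.pyRange ((pre.length : Int) + 1) (((pre ++ prev :: x :: rest').length : Int)) 1
        = ((pre.length : Int) + 1) :: PySem.List.pyRange ((pre.length : Int) + 1 + 1) (((pre ++ prev :: x :: rest').length : Int)) 1 := by
      refine PySem.List.pyRange_one_cons (by simp)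
    have hget1 : PySem.List.pyGetD (pre ++ prev :: x :: rest') ((pre.length : Int) + 1) 0 = x := by
      have hc : (pre.length : Int) + 1 = ((pre.length + 1 : Nat) : Int) := by omega
      rw [hc, PySem.List.pyGetD_natCast, List.getD_eq_getElem?_getD,
        List.getElem?_append_right (by omega)]
      simp
    have hget0 : PySem.List.pyGetD (pre ++ prev :: x :: rest') ((pre.length : Int) + 1 - 1) 0 = prev := by
      have hc : (pre.length : Int) + 1 - 1 = ((pre.length : Nat) : Int) := by omega
      rw [hc, PySem.List.pyGetD_natCast, List.getD_eq_getElem?_getD,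
        List.getElem?_append_right (by omega)]
      simp
    have ihx : ∀ st' : Int × Int × Int × Int × Int,
        proj3 ((PySem.List.pyRange ((pre.length : Int) + 1 + 1) (((pre ++ prev :: x :: rest').length : Int)) 1).foldl
            (lcrBody (pre ++ prev :: x :: rest')) st')
        = aRec x (st'.1, st'.2.1, st'.2.2.1) (st'.2.2.2.1, st'.2.2.2.2) ((pre.length : Int) + 1 + 1) rest' := by
      intro st'
      have h1 : pre ++ prev :: x :: rest' = (pre ++ [prev]) ++ x :: rest' := by simp
      have h2 : ((pre ++ [prev]).length : Int) + 1 = (pre.length : Int) + 1 + 1 := by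
        simp only [List.length_append, List.length_cons, List.length_nil, Nat.cast_add,
          Nat.cast_one, Nat.cast_zero]
        ring
      rw [h1, ← h2]
      exact ih (pre ++ [prev]) x st'
    rw [hcons]
    simp only [List.foldl_cons]
    rw [ihx (lcrBody (pre ++ prev :: x :: rest') st ((pre.length : Int) + 1))]
    rcases Bool.eq_false_or_eq_true (x == prev) with hb | hb <;>
      [skip; skip] <;>
    · simp only [aRec, lcrBody, hget1, hget0, hb, Bool.false_eq_true, if_false, if_true]
      by_cases hp : (if (x == prev) = true then (st.2.2.2.1 + 1, st.2.2.2.2) else (1, (pre.length : Int) + 1)).1 > st.1 <;>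
        simp only [hb, Bool.false_eq_true, if_false, if_true] at hp ⊢ <;>
        simp [hp]

-- ===== VERDICT (by name: the statement is the Claim_ definition above) =====
theorem longest_constant_run_spec : Claim_equal_longest_constant_run := by
  unfold Claim_equal_longest_constant_run
  intro values _ hpre
  unfold Spec_longest_constant_run
  cases values with
  | nil => exact absurd rfl hpre
  | cons v rest =>
    have hA : longest_constant_run (v :: rest) = aRec v (1, 0, v) (1, 0) 1 rest := by
      have h := bridgeA rest [] v (1, 0, PySem.List.pyGetD (v :: rest) 0 0, 1, 0)
      simpa [longest_constant_run, proj3, PySem.List.pyGetD_zero_cons] using h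
    have hB : longest_constant_run_alt (v :: rest) = lcrRun (v :: rest) 0 (1, 0, v) := rfl
    rw [hA, hB, lcrRun_cons,
      mainRun rest.length rest le_rfl v (1, 0, v) 1 0 1 (by omega) (by simp)]
    congr 1
    omega
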